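-- pv_equiv track=rewrite | github.com/guretskiysemyon/AutomatedReasoning | EX2/sat_solver.py | backtrack
-- ===== SOURCE A (Python) =====
-- def backtrack(M, D, possible_D):
--     last_decide = D.pop()
--     i = len(M) - 1
--     while M[i] != last_decide:
--        possible_D.add(abs(M.pop()))
--        i -= 1
--
--     M.pop()
--     M.append(-last_decide)
--     return M
-- ===== SOURCE B (Python) =====
-- def backtrack(M, D, possible_D):
--     last_decide = D.pop()
--     idx = len(M) - 1 - M[::-1].index(last_decide)
--     for lit in M[idx + 1:]:
--         possible_D.add(abs(lit))
--     del M[idx:]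
--     M.append(-last_decide)
--     return M
-- ===== Notes on version B (the rewrite author's own statement) =====
-- stated objective: simpler
-- what changed: Replaces A's pop-one-element-per-iteration while loop with one reverse-index search for the last occurrence of the decision literal, then a single slice pass to collect possible_D and an in-place truncation of the trail.
import Mathlib
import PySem

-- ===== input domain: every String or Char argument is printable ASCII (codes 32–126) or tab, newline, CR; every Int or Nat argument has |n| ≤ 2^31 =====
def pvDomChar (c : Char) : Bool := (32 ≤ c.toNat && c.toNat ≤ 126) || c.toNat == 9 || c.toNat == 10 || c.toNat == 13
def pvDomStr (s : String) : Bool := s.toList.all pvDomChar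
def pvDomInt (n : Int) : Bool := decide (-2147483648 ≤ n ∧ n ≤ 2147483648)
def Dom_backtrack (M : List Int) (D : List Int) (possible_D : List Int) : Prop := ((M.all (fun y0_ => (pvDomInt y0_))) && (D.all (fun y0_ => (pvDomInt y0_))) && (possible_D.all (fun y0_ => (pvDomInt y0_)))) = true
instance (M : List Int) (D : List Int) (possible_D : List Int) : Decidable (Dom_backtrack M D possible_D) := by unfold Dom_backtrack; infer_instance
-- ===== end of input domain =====

-- B locates the last occurrence of the decision literal with one reverse-index search and
-- truncates the trail, instead of A's pop-one-at-a-time while loop (objective: simpler).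
-- Both A and B mutate M, D and possible_D in place identically in Python; the equivalence
-- proved here is about the RETURN value.

-- ===== PORT A =====
-- A's while loop: look at the last element of the trail; if it is not the decision
-- literal, pop it (the possible_D.add only mutates the set, not the return value) and repeat.
def backtrackLoopA (last : Int) (M : List Int) : List Int :=
  match h : M.getLast? with
  | none => []          -- Python: M[i] raises IndexError here; excluded by Pre_
  | some x => if x ≠ last then backtrackLoopA last M.dropLast else M
termination_by M.length
decreasing_by
  have hne : M ≠ [] := by intro hm; simp [hm] at h
  have := List.length_pos_iff.mpr hne
  simp [List.length_dropLast]; omega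

def backtrack (M : List Int) (D : List Int) (possible_D : List Int) : List Int :=
  match D.getLast? with
  | none => []          -- Python: D.pop() raises IndexError; excluded by Pre_
  | some last_decide =>
    let M' := backtrackLoopA last_decide M
    M'.dropLast ++ [-last_decide]   -- final M.pop(); M.append(-last_decide)

-- ===== PORT B =====
def backtrack_alt (M : List Int) (D : List Int) (possible_D : List Int) : List Int :=
  match D.getLast? with
  | none => []          -- D.pop() raises; excluded by Pre_
  | some last_decide =>
    match PySem.List.index? M.reverse last_decide with
    | none => []        -- M[::-1].index raises ValueError; excluded by Pre_
    | some j =>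
      let idx := M.length - 1 - j
      -- the for-loop over M[idx+1:] only mutates possible_D; del M[idx:]; M.append(-last_decide)
      M.take idx ++ [-last_decide]

-- ===== PRECONDITION & SPEC =====
-- Pre_: D nonempty (else D.pop() raises IndexError) and the popped decision literal occurs
-- in M (else both A's scan and B's .index raise).
def Pre_backtrack (M : List Int) (D : List Int) (possible_D : List Int) : Prop :=
  D ≠ [] ∧ (D.getLast?.getD 0) ∈ M
instance (M : List Int) (D : List Int) (possible_D : List Int) : Decidable (Pre_backtrack M D possible_D) := by unfold Pre_backtrack; infer_instance

def pvWitness_backtrack : List Int × List Int × List Int := ([1, -3, 2, 4], [1, 2], [5])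

def Spec_backtrack (M : List Int) (D : List Int) (possible_D : List Int) (out : List Int) : Prop := out = backtrack_alt M D possible_D
instance (M : List Int) (D : List Int) (possible_D : List Int) (out : List Int) : Decidable (Spec_backtrack M D possible_D out) := by unfold Spec_backtrack; infer_instance

-- ===== CLAIM (what is proved, stated in full; the proofs are below) =====
def Claim_equal_backtrack : Prop := ∀ (M : List Int) (D : List Int) (possible_D : List Int), Dom_backtrack M D possible_D → Pre_backtrack M D possible_D → Spec_backtrack M D possible_D (backtrack M D possible_D)

-- ===== LEMMAS AND PROOFS =====

-- Unfolding equation of A's loop at a nonempty trail: inspect the last element.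
theorem loopA_concat (last x : Int) (l : List Int) :
    backtrackLoopA last (l ++ [x]) = if x ≠ last then backtrackLoopA last l else l ++ [x] := by
  rw [backtrackLoopA]
  split
  · rename_i h; simp at h
  · rename_i y h
    rw [List.getLast?_concat] at h
    injection h with h
    subst h
    simp [List.dropLast_concat]

-- If the decision literal occurs in M, the reverse-index search succeeds at some j and
-- A's pop loop leaves exactly the prefix of length (|M| - 1 - j) plus the occurrence.
theorem loopA_eq_take (last : Int) (M : List Int) (hm : last ∈ M) :
    ∃ j, PySem.List.index? M.reverse last = some j ∧
      (backtrackLoopA last M).dropLast = M.take (M.length - 1 - j) := by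
  induction M using List.reverseRecOn with
  | nil => simp at hm
  | append_singleton l x ih =>
    by_cases hx : x = last
    · subst hx
      refine ⟨0, ?_, ?_⟩
      · rw [List.reverse_append, List.reverse_singleton, List.singleton_append,
          PySem.List.index?_cons_self]
      · rw [loopA_concat]
        simp
    · have hl : last ∈ l := by
        rcases List.mem_append.mp hm with h | h
        · exact h
        · simp at h; exact absurd h.symm hx
      obtain ⟨j, hj, hdrop⟩ := ih hl
      refine ⟨j + 1, ?_, ?_⟩
      · rw [List.reverse_append, List.reverse_singleton, List.singleton_append,
          PySem.List.index?_cons_of_ne _ hx, hj]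
        rfl
      · rw [loopA_concat, if_pos hx, hdrop]
        have h1 : (l ++ [x]).length - 1 - (j + 1) = l.length - 1 - j := by
          simp; omega
        rw [h1, List.take_append_of_le_length (by omega)]

-- ===== VERDICT (by name: the statement is the Claim_ definition above) =====
theorem backtrack_spec : Claim_equal_backtrack := by
  intro M D possible_D _ hpre
  obtain ⟨hD, hmem⟩ := hpre
  obtain ⟨last, hlast⟩ := Option.isSome_iff_exists.mp (List.getLast?_isSome.mpr hD)
  have hmem' : last ∈ M := by rwa [hlast] at hmem
  obtain ⟨j, hj, hdrop⟩ := loopA_eq_take last M hmem'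
  unfold Spec_backtrack backtrack backtrack_alt
  simp only [hlast, hj, hdrop]
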